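-- pv_equiv track=rewrite | github.com/terryzhao127/pommerman-implementations | MCTS/mcts_agent.py | _find_items
-- ===== SOURCE A (Python) =====
-- def _find_items(board, bomb_life, bomb_blast_strength):
--     board_size = len(board[0])
--     agent_values = {10, 11, 12, 13}
--     bomb_value = 3
--     flame_value = 4
--
--     agents = []
--     bombs = []
--     flames = []
--
--     for x in range(board_size):
--         for y in range(board_size):
--             if board[x][y] in agent_values:
--                 agents.append((board[x][y], (x, y)))
--             if board[x][y] == bomb_value:
--                 bombs.append(((x, y), bomb_life[x][y], bomb_blast_strength[x][y]))
--             if board[x][y] == flame_value: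
--                 flames.append((x, y))
--
--     return agents, bombs, flames
-- ===== SOURCE B (Python) =====
-- def _find_items(board, bomb_life, bomb_blast_strength):
--     board_size = len(board[0])
--
--     # One pass builds an inverted index: cell value -> flat indices x*n+y in scan order.
--     index = {}
--     for x in range(board_size):
--         for y in range(board_size):
--             index.setdefault(board[x][y], []).append(x * board_size + y)
--
--     # Agents: read the four agent buckets off the index, restore row-major order
--     # by sorting on the flat index, then decode coordinates with divmod.
--     pairs = sorted(((v, i) for v in (10, 11, 12, 13) for i in index.get(v, [])),
--                    key=lambda t: t[1])
--     agents = [(v, divmod(i, board_size)) for v, i in pairs]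
--
--     bombs = [(divmod(i, board_size),
--               bomb_life[i // board_size][i % board_size],
--               bomb_blast_strength[i // board_size][i % board_size])
--              for i in index.get(3, [])]
--     flames = [divmod(i, board_size) for i in index.get(4, [])]
--
--     return agents, bombs, flames
-- ===== Notes on version B (the rewrite author's own statement) =====
-- stated objective: alternative
-- what changed: Replaces A's single scan with three direct tests per cell by one grouping pass that builds an inverted index from cell value to flat positions x*n+y, from which bombs and flames are read off directly and the four agent buckets are re-ordered row-major by sorting on the flat index, with coordinates recovered by divmod.
import Mathlib
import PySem

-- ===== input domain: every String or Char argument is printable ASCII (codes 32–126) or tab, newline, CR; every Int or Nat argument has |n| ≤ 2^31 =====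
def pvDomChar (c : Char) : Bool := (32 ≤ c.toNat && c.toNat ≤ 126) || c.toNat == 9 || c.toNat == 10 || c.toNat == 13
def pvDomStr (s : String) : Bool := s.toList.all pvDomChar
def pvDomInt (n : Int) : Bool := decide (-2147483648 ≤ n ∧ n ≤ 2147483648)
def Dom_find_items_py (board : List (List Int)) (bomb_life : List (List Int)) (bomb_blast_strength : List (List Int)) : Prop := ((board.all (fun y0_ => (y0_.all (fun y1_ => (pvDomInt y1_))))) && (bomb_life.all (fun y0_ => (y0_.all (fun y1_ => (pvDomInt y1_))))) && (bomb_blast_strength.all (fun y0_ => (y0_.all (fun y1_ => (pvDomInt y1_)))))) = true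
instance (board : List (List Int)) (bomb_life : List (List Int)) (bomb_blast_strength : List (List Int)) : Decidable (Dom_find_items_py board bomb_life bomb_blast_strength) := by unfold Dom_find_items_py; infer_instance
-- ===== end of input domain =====

-- B replaces A's single scan with three tests per cell by a grouping pass that builds an
-- inverted index cell-value -> flat positions x*n+y; bombs and flames are read off the
-- index directly and the agents' row-major order is restored by sorting the four agent
-- buckets on the flat index, decoding coordinates with divmod (objective: alternative).

-- g[x][y] with a default; only used where Pre_ guarantees the indices are in range.

def pvCell (g : List (List Int)) (x y : Int) : Int :=
  PySem.List.pyGetD (PySem.List.pyGetD g x []) y 0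

-- ===== PORT A =====
-- agent_values = {10, 11, 12, 13}
def pvAgentValues : PySem.Set Int := PySem.Set.ofList [10, 11, 12, 13]

-- body of A's inner 'for y' loop
def pvStepA (board bomb_life bomb_blast_strength : List (List Int)) (x : Int)
    (acc : (List (Int × (Int × Int))) × (List ((Int × Int) × Int × Int)) × (List (Int × Int)))
    (y : Int) :
    (List (Int × (Int × Int))) × (List ((Int × Int) × Int × Int)) × (List (Int × Int)) :=
  let v := pvCell board x y
  let agents := if PySem.Set.contains pvAgentValues v then acc.1 ++ [(v, (x, y))] else acc.1
  let bombs := if v == 3 then acc.2.1 ++ [((x, y), pvCell bomb_life x y, pvCell bomb_blast_strength x y)] else acc.2.1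
  let flames := if v == 4 then acc.2.2 ++ [(x, y)] else acc.2.2
  (agents, bombs, flames)

def find_items_py (board : List (List Int)) (bomb_life : List (List Int)) (bomb_blast_strength : List (List Int)) : (List (Int × (Int × Int))) × (List ((Int × Int) × Int × Int)) × (List (Int × Int)) :=
  let board_size : Int := (PySem.List.pyGetD board 0 []).length
  (PySem.List.pyRange 0 board_size 1).foldl
    (fun acc x => (PySem.List.pyRange 0 board_size 1).foldl
      (pvStepA board bomb_life bomb_blast_strength x) acc)
    ([], [], [])

-- ===== PORT B =====
-- index.setdefault(board[x][y], []).append(x*n+y)  ==  index[k] = index.get(k, []) + [x*n+y]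
def pvIndex (board : List (List Int)) (n : Int) : PySem.Dict Int (List Int) :=
  (PySem.List.pyRange 0 n 1).foldl
    (fun d x => (PySem.List.pyRange 0 n 1).foldl
      (fun d y => d.modify (pvCell board x y) [] (· ++ [x * n + y])) d)
    PySem.Dict.empty

def find_items_py_alt (board : List (List Int)) (bomb_life : List (List Int)) (bomb_blast_strength : List (List Int)) : (List (Int × (Int × Int))) × (List ((Int × Int) × Int × Int)) × (List (Int × Int)) :=
  let n : Int := (PySem.List.pyGetD board 0 []).length
  let index := pvIndex board n
  let pairs := PySem.List.sorted
    (([10, 11, 12, 13] : List Int).flatMap (fun v => (index.getD v []).map (fun i => (v, i))))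
    (fun t => t.2)
  let agents := pairs.map (fun t => (t.1, (PySem.Int.floordiv t.2 n, PySem.Int.mod t.2 n)))
  let bombs := (index.getD 3 []).map (fun i =>
    ((PySem.Int.floordiv i n, PySem.Int.mod i n),
     pvCell bomb_life (PySem.Int.floordiv i n) (PySem.Int.mod i n),
     pvCell bomb_blast_strength (PySem.Int.floordiv i n) (PySem.Int.mod i n)))
  let flames := (index.getD 4 []).map (fun i => (PySem.Int.floordiv i n, PySem.Int.mod i n))
  (agents, bombs, flames)

-- ===== PRECONDITION & SPEC =====
-- Pre_ excludes exactly the inputs on which Python A raises IndexError: empty board,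
-- fewer than board_size rows, a visited row shorter than board_size, or a bomb cell
-- whose bomb_life / bomb_blast_strength entry is missing.
def Pre_find_items_py (board : List (List Int)) (bomb_life : List (List Int)) (bomb_blast_strength : List (List Int)) : Prop :=
  board ≠ [] ∧
  (board.headD []).length ≤ board.length ∧
  ∀ x ∈ List.range (board.headD []).length,
    (board.headD []).length ≤ (board.getD x []).length ∧
    ∀ y ∈ List.range (board.headD []).length,
      (board.getD x []).getD y 0 = 3 →
        (x < bomb_life.length ∧ y < ((bomb_life.getD x []).length) ∧
         x < bomb_blast_strength.length ∧ y < ((bomb_blast_strength.getD x []).length))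
instance (board : List (List Int)) (bomb_life : List (List Int)) (bomb_blast_strength : List (List Int)) : Decidable (Pre_find_items_py board bomb_life bomb_blast_strength) := by unfold Pre_find_items_py; infer_instance

def pvWitness_find_items_py : List (List Int) × List (List Int) × List (List Int) :=
  ([[10, 3], [4, 0]], [[0, 5], [0, 0]], [[0, 2], [0, 0]])

def Spec_find_items_py (board : List (List Int)) (bomb_life : List (List Int)) (bomb_blast_strength : List (List Int)) (out : (List (Int × (Int × Int))) × (List ((Int × Int) × Int × Int)) × (List (Int × Int))) : Prop := out = find_items_py_alt board bomb_life bomb_blast_strength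
instance (board : List (List Int)) (bomb_life : List (List Int)) (bomb_blast_strength : List (List Int)) (out : (List (Int × (Int × Int))) × (List ((Int × Int) × Int × Int)) × (List (Int × Int))) : Decidable (Spec_find_items_py board bomb_life bomb_blast_strength out) := by unfold Spec_find_items_py; infer_instance

-- ===== CLAIM (what is proved, stated in full; the proofs are below) =====
def Claim_equal_find_items_py : Prop := ∀ (board : List (List Int)) (bomb_life : List (List Int)) (bomb_blast_strength : List (List Int)), Dom_find_items_py board bomb_life bomb_blast_strength → Pre_find_items_py board bomb_life bomb_blast_strength → Spec_find_items_py board bomb_life bomb_blast_strength (find_items_py board bomb_life bomb_blast_strength)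

-- ===== LEMMAS AND PROOFS =====

-- the grid flattened in scan order: (value, flat index x*n+y)
def pvCells (board : List (List Int)) (n : Int) : List (Int × Int) :=
  (PySem.List.pyRange 0 n 1).flatMap (fun x =>
    (PySem.List.pyRange 0 n 1).map (fun y => (pvCell board x y, x * n + y)))

-- decoding a flat index: for 0 ≤ y < n, (x*n+y) // n = x and (x*n+y) % n = y
theorem pv_fdiv (x y n : Int) (h0 : 0 ≤ y) (h1 : y < n) :
    PySem.Int.floordiv (x * n + y) n = x := by
  rw [PySem.Int.floordiv_eq_iff_of_pos (by omega)]
  constructor <;> nlinarith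

theorem pv_fmod (x y n : Int) (h0 : 0 ≤ y) (h1 : y < n) :
    PySem.Int.mod (x * n + y) n = y := by
  have h := PySem.Int.floordiv_mul_add_mod (x * n + y) n
  rw [pv_fdiv x y n h0 h1] at h
  omega

-- the index bucket of value v is the scan-order list of v's flat positions
theorem pv_index_getD (board : List (List Int)) (n : Int) (v : Int) :
    (pvIndex board n).getD v [] =
      ((pvCells board n).filter (fun c => c.1 == v)).map (fun c => c.2) := by
  have h : pvIndex board n =
      (pvCells board n).foldl (fun d p => d.modify p.1 [] (· ++ [p.2])) PySem.Dict.empty := by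
    unfold pvIndex pvCells
    rw [List.foldl_flatMap]
    simp [List.foldl_map]
  rw [h, PySem.Dict.getD_foldl_modify_append]
  simp

-- flat indices of pvCells are strictly increasing in scan order
theorem pv_cells_pairwise (board : List (List Int)) (n : Int) :
    (pvCells board n).Pairwise (fun c d => c.2 < d.2) := by
  unfold pvCells
  rw [List.pairwise_flatMap]
  constructor
  · intro x hx
    rw [List.pairwise_map]
    exact (PySem.List.pairwise_lt_pyRange_one 0 n).imp (by intro a b h; omega)
  · refine (PySem.List.pairwise_lt_pyRange_one 0 n).imp ?_
    intro x x' hxx' p hp q hq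
    simp only [List.mem_map] at hp hq
    obtain ⟨y, hy, rfl⟩ := hp
    obtain ⟨y', hy', rfl⟩ := hq
    rw [PySem.List.mem_pyRange_one] at hy hy'
    have : x * n + n ≤ x' * n := by nlinarith
    simp only
    omega

-- decoding one row: divmod(x*n+y, n) recovers (x, y) under the filtered map
theorem pv_row {β : Type} (board : List (List Int)) (n x : Int) (p : Int → Bool)
    (g : Int → Int → Int → β) :
    (((PySem.List.pyRange 0 n 1).map (fun y => (pvCell board x y, x * n + y))).filter
        (fun c => p c.1)).map
      (fun c => g c.1 (PySem.Int.floordiv c.2 n) (PySem.Int.mod c.2 n)) =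
    ((PySem.List.pyRange 0 n 1).filter (fun y => p (pvCell board x y))).map
      (fun y => g (pvCell board x y) x y) := by
  rw [List.filter_map, List.map_map]
  apply List.map_congr_left
  intro y hy
  have hy' := List.mem_of_mem_filter hy
  rw [PySem.List.mem_pyRange_one] at hy'
  simp [pv_fdiv x y n hy'.1 hy'.2, pv_fmod x y n hy'.1 hy'.2]

-- grouping by a nodup list of values is a permutation of the combined filter
theorem pv_group_perm {α : Type} (vs : List Int) (hnd : vs.Nodup) (l : List (Int × α)) :
    (vs.flatMap (fun v => l.filter (fun c => c.1 == v))).Perm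
      (l.filter (fun c => vs.contains c.1)) := by
  induction l with
  | nil => simp
  | cons c l ih =>
    rw [List.filter_cons]
    by_cases hm : c.1 ∈ vs
    · obtain ⟨vs1, vs2, hvs⟩ := List.append_of_mem hm
      have hnd' := hvs ▸ hnd
      have hnotin1 : c.1 ∉ vs1 := by
        intro h
        have hd := (List.nodup_append.mp hnd').2.2
        exact hd c.1 h c.1 List.mem_cons_self rfl
      have hnotin2 : c.1 ∉ vs2 :=
        (List.nodup_cons.mp (List.Nodup.of_append_right hnd')).1
      have hcont : (vs.contains c.1) = true := by simpa [List.contains_eq_mem] using hm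
      simp only [hcont]
      have key : vs.flatMap (fun v => (c :: l).filter (fun d => d.1 == v)) =
          vs1.flatMap (fun v => l.filter (fun d => d.1 == v)) ++
            (c :: l.filter (fun d => d.1 == c.1) ++
             vs2.flatMap (fun v => l.filter (fun d => d.1 == v))) := by
        rw [hvs, List.flatMap_append, List.flatMap_cons]
        congr 1
        · apply List.flatMap_congr
          intro v hv
          rw [List.filter_cons]
          have : (c.1 == v) = false := by
            simp only [beq_eq_false_iff_ne, ne_eq]
            exact fun h => hnotin1 (h ▸ hv)
          simp [this]
        · congr 1
          · rw [List.filter_cons]; simp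
          · apply List.flatMap_congr
            intro v hv
            rw [List.filter_cons]
            have : (c.1 == v) = false := by
              simp only [beq_eq_false_iff_ne, ne_eq]
              exact fun h => hnotin2 (h ▸ hv)
            simp [this]
      rw [key]
      refine List.Perm.trans List.perm_middle ?_
      refine List.Perm.cons c ?_
      have : vs1.flatMap (fun v => l.filter (fun d => d.1 == v)) ++
            (l.filter (fun d => d.1 == c.1) ++
             vs2.flatMap (fun v => l.filter (fun d => d.1 == v))) =
          vs.flatMap (fun v => l.filter (fun d => d.1 == v)) := by
        rw [hvs, List.flatMap_append, List.flatMap_cons]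
      simp only [List.append_eq]
      rw [this]; exact ih
    · have hcont : (vs.contains c.1) = false := by simpa [List.contains_eq_mem] using hm
      simp only [hcont]
      have key : vs.flatMap (fun v => (c :: l).filter (fun d => d.1 == v)) =
          vs.flatMap (fun v => l.filter (fun d => d.1 == v)) := by
        apply List.flatMap_congr
        intro v hv
        rw [List.filter_cons]
        have : (c.1 == v) = false := by
          simp only [beq_eq_false_iff_ne, ne_eq]
          exact fun h => hm (h ▸ hv)
        simp [this]
      rw [key]; exact ih

theorem pv_contains_eq (v : Int) :
    PySem.Set.contains pvAgentValues v = ([10, 11, 12, 13] : List Int).contains v := by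
  simp [pvAgentValues, PySem.Set.contains, PySem.Set.ofList, List.contains_eq_mem]

-- B's flames list equals A's flames comprehension
theorem pv_flames_eq (board : List (List Int)) (n : Int) :
    ((pvIndex board n).getD 4 []).map
        (fun i => (PySem.Int.floordiv i n, PySem.Int.mod i n)) =
      (PySem.List.pyRange 0 n 1).flatMap (fun x =>
        ((PySem.List.pyRange 0 n 1).filter (fun y => pvCell board x y == 4)).map
          (fun y => (x, y))) := by
  rw [pv_index_getD, List.map_map]
  unfold pvCells
  rw [List.filter_flatMap, List.map_flatMap]
  apply List.flatMap_congr
  intro x hx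
  exact pv_row board n x (fun v => v == 4) (fun _ xx yy => (xx, yy))

-- B's bombs list equals A's bombs comprehension
theorem pv_bombs_eq (board bomb_life bomb_blast_strength : List (List Int)) (n : Int) :
    ((pvIndex board n).getD 3 []).map (fun i =>
        ((PySem.Int.floordiv i n, PySem.Int.mod i n),
         pvCell bomb_life (PySem.Int.floordiv i n) (PySem.Int.mod i n),
         pvCell bomb_blast_strength (PySem.Int.floordiv i n) (PySem.Int.mod i n))) =
      (PySem.List.pyRange 0 n 1).flatMap (fun x =>
        ((PySem.List.pyRange 0 n 1).filter (fun y => pvCell board x y == 3)).map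
          (fun y => ((x, y), pvCell bomb_life x y, pvCell bomb_blast_strength x y))) := by
  rw [pv_index_getD, List.map_map]
  unfold pvCells
  rw [List.filter_flatMap, List.map_flatMap]
  apply List.flatMap_congr
  intro x hx
  exact pv_row board n x (fun v => v == 3)
    (fun _ xx yy => ((xx, yy), pvCell bomb_life xx yy, pvCell bomb_blast_strength xx yy))

-- the four agent buckets, re-paired with their value, are exactly the agent cells
theorem pv_pairs_eq (board : List (List Int)) (n : Int) :
    ([10, 11, 12, 13] : List Int).flatMap (fun v =>
        (((pvIndex board n).getD v []).map (fun i => (v, i)))) =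
      ([10, 11, 12, 13] : List Int).flatMap (fun v =>
        (pvCells board n).filter (fun c => c.1 == v)) := by
  apply List.flatMap_congr
  intro v hv
  rw [pv_index_getD, List.map_map]
  have h : ∀ c ∈ (pvCells board n).filter (fun c => c.1 == v),
      ((fun i => (v, i)) ∘ fun c => c.2) c = id c := by
    intro c hc
    have := (List.mem_filter.mp hc).2
    simp only [beq_iff_eq] at this
    simp [← this]
  rw [List.map_congr_left h, List.map_id]

-- sorting the grouped agent pairs by flat index restores scan order
theorem pv_sorted_eq (board : List (List Int)) (n : Int) :
    PySem.List.sorted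
        (([10, 11, 12, 13] : List Int).flatMap (fun v =>
          (((pvIndex board n).getD v []).map (fun i => (v, i)))))
        (fun t => t.2) =
      (pvCells board n).filter (fun c => ([10, 11, 12, 13] : List Int).contains c.1) := by
  rw [pv_pairs_eq]
  apply PySem.List.sorted_eq_of_perm_of_pairwise_lt
  · exact (pv_group_perm [10, 11, 12, 13] (by decide) (pvCells board n)).symm
  · exact List.Pairwise.sublist List.filter_sublist (pv_cells_pairwise board n)

-- B's agents list equals A's agents comprehension
theorem pv_agents_eq (board : List (List Int)) (n : Int) :
    (PySem.List.sorted
        (([10, 11, 12, 13] : List Int).flatMap (fun v =>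
          (((pvIndex board n).getD v []).map (fun i => (v, i)))))
        (fun t => t.2)).map
      (fun t => (t.1, (PySem.Int.floordiv t.2 n, PySem.Int.mod t.2 n))) =
      (PySem.List.pyRange 0 n 1).flatMap (fun x =>
        ((PySem.List.pyRange 0 n 1).filter
            (fun y => PySem.Set.contains pvAgentValues (pvCell board x y))).map
          (fun y => (pvCell board x y, (x, y)))) := by
  rw [pv_sorted_eq]
  unfold pvCells
  rw [List.filter_flatMap, List.map_flatMap]
  apply List.flatMap_congr
  intro x hx
  have := pv_row board n x (fun v => ([10, 11, 12, 13] : List Int).contains v)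
    (fun v xx yy => (v, (xx, yy)))
  simp only [pv_contains_eq]
  exact this

-- A's inner loop over one row appends exactly the per-row comprehension results.
theorem pv_inner_eq (board bomb_life bomb_blast_strength : List (List Int)) (x : Int)
    (ys : List Int)
    (a : List (Int × (Int × Int))) (b : List ((Int × Int) × Int × Int)) (c : List (Int × Int)) :
    ys.foldl (pvStepA board bomb_life bomb_blast_strength x) (a, b, c) =
      (a ++ (ys.filter (fun y => PySem.Set.contains pvAgentValues (pvCell board x y))).map
              (fun y => (pvCell board x y, (x, y))),
       b ++ (ys.filter (fun y => pvCell board x y == 3)).map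
              (fun y => ((x, y), pvCell bomb_life x y, pvCell bomb_blast_strength x y)),
       c ++ (ys.filter (fun y => pvCell board x y == 4)).map (fun y => (x, y))) := by
  induction ys generalizing a b c with
  | nil => simp
  | cons y ys ih =>
    simp only [List.foldl_cons, pvStepA, List.filter_cons]
    split_ifs with h1 h2 h3 h2 h3 <;>
      simp_all [List.append_assoc]

-- A's outer loop appends exactly the flatMap comprehension results.
theorem pv_outer_eq (board bomb_life bomb_blast_strength : List (List Int)) (r : List Int)
    (xs : List Int)
    (a : List (Int × (Int × Int))) (b : List ((Int × Int) × Int × Int)) (c : List (Int × Int)) :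
    xs.foldl (fun acc x => r.foldl (pvStepA board bomb_life bomb_blast_strength x) acc) (a, b, c) =
      (a ++ xs.flatMap (fun x =>
         (r.filter (fun y => PySem.Set.contains pvAgentValues (pvCell board x y))).map
           (fun y => (pvCell board x y, (x, y)))),
       b ++ xs.flatMap (fun x =>
         (r.filter (fun y => pvCell board x y == 3)).map
           (fun y => ((x, y), pvCell bomb_life x y, pvCell bomb_blast_strength x y))),
       c ++ xs.flatMap (fun x =>
         (r.filter (fun y => pvCell board x y == 4)).map (fun y => (x, y)))) := by
  induction xs generalizing a b c with
  | nil => simp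
  | cons x xs ih =>
    simp only [List.foldl_cons, List.flatMap_cons]
    rw [pv_inner_eq, ih]
    simp [List.append_assoc]

-- the two ports agree on every input
theorem pv_final (board bomb_life bomb_blast_strength : List (List Int)) :
    find_items_py board bomb_life bomb_blast_strength
      = find_items_py_alt board bomb_life bomb_blast_strength := by
  unfold find_items_py find_items_py_alt
  rw [pv_outer_eq]
  simp only [List.nil_append]
  exact Prod.ext (pv_agents_eq _ _).symm
    (Prod.ext (pv_bombs_eq _ _ _ _).symm (pv_flames_eq _ _).symm)

-- ===== VERDICT (by name: the statement is the Claim_ definition above) =====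
theorem find_items_py_spec : Claim_equal_find_items_py := by
  intro board bomb_life bomb_blast_strength _ _
  unfold Spec_find_items_py
  exact pv_final board bomb_life bomb_blast_strength
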